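-- pv_equiv track=rewrite | github.com/cliff363825/TwentyFour | 01_Language/01_Functions/python/ctype_graph.py | ctype_graph
-- ===== SOURCE A (Python) =====
-- def ctype_graph(s):
--     if s is None or len(s) == 0:
--         return False
--     for i in s:
--         code = ord(i)
--         if 32 < code <= 126:
--             continue
--         return False
--     return True
-- ===== SOURCE B (Python) =====
-- def ctype_graph(s):
--     if s is None or len(s) == 0:
--         return False
--     return min(s) > ' ' and max(s) <= '~'
-- ===== Notes on version B (the rewrite author's own statement) =====
-- stated objective: simpler
-- what changed: Replaced the per-character early-exit scan with two aggregate reductions: compare min(s) and max(s) against the space and tilde boundary characters.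
import Mathlib
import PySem

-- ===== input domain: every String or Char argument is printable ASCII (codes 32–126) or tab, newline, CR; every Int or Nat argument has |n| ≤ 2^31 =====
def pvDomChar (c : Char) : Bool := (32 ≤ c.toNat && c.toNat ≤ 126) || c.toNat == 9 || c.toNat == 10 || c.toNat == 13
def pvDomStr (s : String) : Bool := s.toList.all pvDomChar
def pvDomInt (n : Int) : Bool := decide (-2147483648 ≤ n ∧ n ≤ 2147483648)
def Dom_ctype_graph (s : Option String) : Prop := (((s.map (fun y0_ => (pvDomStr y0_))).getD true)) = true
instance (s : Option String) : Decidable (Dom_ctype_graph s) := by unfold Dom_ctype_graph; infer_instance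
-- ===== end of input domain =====

-- B replaces A's per-character early-exit scan by two aggregate reductions (min and max
-- of the characters) compared against the boundary characters ' ' and '~' (simpler).

-- ===== PORT A =====
-- the for-loop over the characters: return False on the first character out of range
def ctypeGraphLoop : List Char → Bool
  | [] => true
  | c :: cs =>
      let code := c.toNat
      if 32 < code ∧ code ≤ 126 then ctypeGraphLoop cs else false

def ctype_graph (s : Option String) : Bool :=
  match s with
  | none => false
  | some t => if t.toList.length = 0 then false else ctypeGraphLoop t.toList

-- ===== PORT B =====
-- min(s) / max(s): fold of the binary min/max over the characters
def charsMin (c : Char) (cs : List Char) : Char :=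
  cs.foldl (fun a b => if b < a then b else a) c

def charsMax (c : Char) (cs : List Char) : Char :=
  cs.foldl (fun a b => if a < b then b else a) c

def ctype_graph_alt (s : Option String) : Bool :=
  match s with
  | none => false
  | some t =>
    if t.toList.length = 0 then false
    else
      match t.toList with
      | [] => false
      | c :: cs => decide (' ' < charsMin c cs) && decide (charsMax c cs ≤ '~')

-- ===== PRECONDITION & SPEC =====
def Spec_ctype_graph (s : Option String) (out : Bool) : Prop := out = ctype_graph_alt s
instance (s : Option String) (out : Bool) : Decidable (Spec_ctype_graph s out) := by unfold Spec_ctype_graph; infer_instance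

-- ===== CLAIM (what is proved, stated in full; the proofs are below) =====
def Claim_equal_ctype_graph : Prop := ∀ (s : Option String), Dom_ctype_graph s → Spec_ctype_graph s (ctype_graph s)

-- ===== LEMMAS AND PROOFS =====

theorem sp_lt_iff (c : Char) : ' ' < c ↔ 32 < c.toNat := by
  rw [Char.lt_def, show (' ').val = (32:UInt32) from rfl, UInt32.lt_iff_toNat_lt]
  exact Iff.rfl

theorem le_tilde_iff (c : Char) : c ≤ '~' ↔ c.toNat ≤ 126 := by
  rw [Char.le_def, show ('~').val = (126:UInt32) from rfl, UInt32.le_iff_toNat_le]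
  exact Iff.rfl

theorem charsMin_gt (x c : Char) (cs : List Char) :
    x < charsMin c cs ↔ x < c ∧ ∀ b ∈ cs, x < b := by
  induction cs generalizing c with
  | nil => simp [charsMin]
  | cons b bs ih =>
    simp only [charsMin, List.foldl_cons, List.mem_cons]
    rw [show (List.foldl (fun a b => if b < a then b else a) (if b < c then b else c) bs)
        = charsMin (if b < c then b else c) bs from rfl, ih]
    by_cases h : b < c <;> simp only [h, if_pos, if_false] <;>
      constructor <;> rintro ⟨h1, h2⟩
    · exact ⟨lt_trans h1 h, fun y hy => hy.elim (fun e => e ▸ h1) (h2 y)⟩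
    · exact ⟨h2 b (Or.inl rfl), fun y hy => h2 y (Or.inr hy)⟩
    · exact ⟨h1, fun y hy => hy.elim
        (fun e => by subst e; exact lt_of_lt_of_le h1 (le_of_not_gt h)) (h2 y)⟩
    · exact ⟨h1, fun y hy => h2 y (Or.inr hy)⟩

theorem charsMax_le (x c : Char) (cs : List Char) :
    charsMax c cs ≤ x ↔ c ≤ x ∧ ∀ b ∈ cs, b ≤ x := by
  induction cs generalizing c with
  | nil => simp [charsMax]
  | cons b bs ih =>
    simp only [charsMax, List.foldl_cons, List.mem_cons]
    rw [show (List.foldl (fun a b => if a < b then b else a) (if c < b then b else c) bs)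
        = charsMax (if c < b then b else c) bs from rfl, ih]
    by_cases h : c < b <;> simp only [h, if_pos, if_false] <;>
      constructor <;> rintro ⟨h1, h2⟩
    · exact ⟨le_of_lt (lt_of_lt_of_le h h1),
        fun y hy => hy.elim (fun e => e ▸ h1) (h2 y)⟩
    · exact ⟨h2 b (Or.inl rfl), fun y hy => h2 y (Or.inr hy)⟩
    · exact ⟨h1, fun y hy => hy.elim
        (fun e => by subst e; exact le_trans (le_of_not_gt h) h1) (h2 y)⟩
    · exact ⟨h1, fun y hy => h2 y (Or.inr hy)⟩

theorem loop_iff (cs : List Char) :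
    ctypeGraphLoop cs = true ↔ ∀ c ∈ cs, 32 < c.toNat ∧ c.toNat ≤ 126 := by
  induction cs with
  | nil => simp [ctypeGraphLoop]
  | cons c cs ih =>
    simp only [ctypeGraphLoop]
    split_ifs with h
    · simp [ih, h]
    · simp only [false_iff]
      intro hall
      exact h (hall c (List.mem_cons_self ..))

-- ===== VERDICT (by name: the statement is the Claim_ definition above) =====
theorem ctype_graph_spec : Claim_equal_ctype_graph := by
  intro s _
  unfold Spec_ctype_graph ctype_graph ctype_graph_alt
  cases s with
  | none => rfl
  | some t =>
    show (if t.toList.length = 0 then false else ctypeGraphLoop t.toList)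
        = (if t.toList.length = 0 then false
           else match t.toList with
             | [] => false
             | c :: cs => decide (' ' < charsMin c cs) && decide (charsMax c cs ≤ '~'))
    match h : t.toList with
    | [] => rfl
    | c :: cs =>
      simp only [List.length_cons]
      rw [if_neg (by omega), if_neg (by omega)]
      rw [Bool.eq_iff_iff]
      simp only [Bool.and_eq_true, decide_eq_true_eq]
      rw [loop_iff, charsMin_gt, charsMax_le]
      constructor
      · intro hall
        have hc := hall c (List.mem_cons_self ..)
        exact ⟨⟨(sp_lt_iff c).mpr hc.1,
            fun b hb => (sp_lt_iff b).mpr (hall b (List.mem_cons_of_mem _ hb)).1⟩,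
          (le_tilde_iff c).mpr hc.2,
            fun b hb => (le_tilde_iff b).mpr (hall b (List.mem_cons_of_mem _ hb)).2⟩
      · rintro ⟨⟨hc1, hmn⟩, hc2, hmx⟩
        intro y hy
        rcases List.mem_cons.mp hy with e | hm
        · subst e
          exact ⟨(sp_lt_iff y).mp hc1, (le_tilde_iff y).mp hc2⟩
        · exact ⟨(sp_lt_iff y).mp (hmn y hm), (le_tilde_iff y).mp (hmx y hm)⟩
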